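-- pv_equiv track=rewrite | github.com/OrderofChaos33/sincor | legal_guardrails.py | _get_required_actions
-- ===== SOURCE A (Python) =====
-- from typing import Dict, List, Tuple, Any
--
-- def _get_required_actions(violations: List[Dict[str, Any]]) -> List[str]:
--     """Get required actions to address violations."""
--     actions = []
--
--     for violation in violations:
--         if violation["type"] == "prohibited_term":
--             actions.append(f"Remove or replace prohibited term: {violation['term']}")
--         elif violation["type"] == "missing_sender_id":
--             actions.append("Add clear sender identification to email")
--         elif violation["type"] == "missing_physical_address":
--             actions.append("Include physical business address in email footer")
--         elif violation["type"] == "missing_unsubscribe":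
--             actions.append("Add clear unsubscribe link and instructions")
--         elif violation["type"] == "unsubstantiated_earnings_claim":
--             actions.append("Add earnings disclaimers or remove specific income claims")
--         elif violation["type"] == "missing_consent":
--             actions.append("Obtain explicit user consent before data processing")
--         elif violation["type"] == "missing_disclosure":
--             actions.append(f"Complete FTC-required disclosure: {violation['element']}")
--
--     return list(set(actions))  # Remove duplicates
-- ===== SOURCE B (Python) =====
-- from typing import Dict, List, Any
--
-- # Format templates for each actionable violation type; "{term}"/"{element}" are
-- # filled from the violation dict itself (KeyError if missing, like the original).
-- _TEMPLATES = {
--     "prohibited_term": "Remove or replace prohibited term: {term}",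
--     "missing_sender_id": "Add clear sender identification to email",
--     "missing_physical_address": "Include physical business address in email footer",
--     "missing_unsubscribe": "Add clear unsubscribe link and instructions",
--     "unsubstantiated_earnings_claim": "Add earnings disclaimers or remove specific income claims",
--     "missing_consent": "Obtain explicit user consent before data processing",
--     "missing_disclosure": "Complete FTC-required disclosure: {element}",
-- }
--
--
-- def _get_required_actions(violations: List[Dict[str, Any]]) -> List[str]:
--     """Get required actions to address violations.
--
--     Streams the violations once, formatting each known type from its template
--     and deduplicating on the fly with a `seen` set, so the result is already
--     unique (in first-occurrence order; the original's list(set(...)) order is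
--     unspecified anyway).
--     """
--     seen = set()
--     actions = []
--     for violation in violations:
--         template = _TEMPLATES.get(violation["type"])
--         if template is None:
--             continue
--         action = template.format(**violation)
--         if action not in seen:
--             seen.add(action)
--             actions.append(action)
--     return actions
-- ===== Notes on version B (the rewrite author's own statement) =====
-- stated objective: alternative
-- what changed: A appends a message per if/elif branch and deduplicates afterwards with list(set(actions)); B renders each message from a format-template table and deduplicates on the fly with a seen-set, returning the already-unique list in first-occurrence order (equal as a set; A's set order is unspecified).
import Mathlib
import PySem

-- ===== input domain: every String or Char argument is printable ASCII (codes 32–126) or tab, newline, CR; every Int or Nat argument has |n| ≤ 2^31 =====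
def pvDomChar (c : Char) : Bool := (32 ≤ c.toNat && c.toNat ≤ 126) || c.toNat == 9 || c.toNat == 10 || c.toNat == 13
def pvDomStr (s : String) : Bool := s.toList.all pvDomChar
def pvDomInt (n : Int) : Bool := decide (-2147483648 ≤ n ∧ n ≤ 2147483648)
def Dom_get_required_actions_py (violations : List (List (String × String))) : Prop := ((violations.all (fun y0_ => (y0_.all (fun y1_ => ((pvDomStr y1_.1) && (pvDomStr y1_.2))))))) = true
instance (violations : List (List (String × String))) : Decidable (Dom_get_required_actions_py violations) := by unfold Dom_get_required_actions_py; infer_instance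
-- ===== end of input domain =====

-- B renders messages from a format-template table and deduplicates on the fly with a seen-set
-- instead of A's branch ladder plus trailing list(set(...)); equal results as a set (B returns
-- first-occurrence order; A's Python set order is unspecified, and the port of A models it as
-- PySem.Set.ofList).


-- ===== PORT A =====
-- loop body of A: the if/elif chain appending the matching action (dict access via getD, total under Pre_)
def pvStepA (actions : List String) (violation : List (String × String)) : List String :=
  let t := (PySem.Dict.mk violation).getD "type" ""
  if t == "prohibited_term" then
    actions ++ ["Remove or replace prohibited term: " ++ (PySem.Dict.mk violation).getD "term" ""]
  else if t == "missing_sender_id" then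
    actions ++ ["Add clear sender identification to email"]
  else if t == "missing_physical_address" then
    actions ++ ["Include physical business address in email footer"]
  else if t == "missing_unsubscribe" then
    actions ++ ["Add clear unsubscribe link and instructions"]
  else if t == "unsubstantiated_earnings_claim" then
    actions ++ ["Add earnings disclaimers or remove specific income claims"]
  else if t == "missing_consent" then
    actions ++ ["Obtain explicit user consent before data processing"]
  else if t == "missing_disclosure" then
    actions ++ ["Complete FTC-required disclosure: " ++ (PySem.Dict.mk violation).getD "element" ""]
  else actions

-- list(set(actions)): Python's set iteration order is not modelled; PySem.Set.ofList (first occurrences) is the sanctioned port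
def get_required_actions_py (violations : List (List (String × String))) : List String :=
  PySem.Set.ofList (violations.foldl pvStepA [])

-- ===== PORT B =====
-- the module-level table _TEMPLATES of Source B
def pvTemplates : PySem.Dict String String :=
  PySem.Dict.mk
    [("prohibited_term", "Remove or replace prohibited term: {term}"),
     ("missing_sender_id", "Add clear sender identification to email"),
     ("missing_physical_address", "Include physical business address in email footer"),
     ("missing_unsubscribe", "Add clear unsubscribe link and instructions"),
     ("unsubstantiated_earnings_claim", "Add earnings disclaimers or remove specific income claims"),
     ("missing_consent", "Obtain explicit user consent before data processing"),
     ("missing_disclosure", "Complete FTC-required disclosure: {element}")]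

-- hand port of str.format(**violation) for these templates: copy literal chars, and for each
-- "{name}" substitute the dict value (exact here: the templates contain no escaped braces or
-- format specs, and under Pre_ every referenced field is present, so getD never defaults)
def pvFormatGo (v : PySem.Dict String String) (acc : List Char) : List Char → String
  | [] => String.mk acc.reverse
  | '{' :: rest =>
      String.mk acc.reverse ++
        (v.getD (String.mk (rest.takeWhile (· ≠ '}'))) "" ++
          pvFormatGo v [] ((rest.dropWhile (· ≠ '}')).drop 1))
  | c :: rest => pvFormatGo v (c :: acc) rest
  termination_by cs => cs.length
  decreasing_by
  · simp only [List.length_cons]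
    rw [List.length_drop]
    have h1 := List.length_dropWhile_le (fun c => decide (c ≠ '}')) rest
    omega
  · simp

def pvFormat (template : String) (v : PySem.Dict String String) : String :=
  pvFormatGo v [] template.toList

-- loop body of B: seen-set + ordered output, one template lookup and format per violation
def pvStepB (st : PySem.Set String × List String) (violation : List (String × String)) :
    PySem.Set String × List String :=
  match pvTemplates.get? ((PySem.Dict.mk violation).getD "type" "") with
  | none => st
  | some template =>
      let action := pvFormat template (PySem.Dict.mk violation)
      if PySem.Set.contains st.1 action then st
      else (PySem.Set.add st.1 action, st.2 ++ [action])

def get_required_actions_py_alt (violations : List (List (String × String))) : List String :=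
  (violations.foldl pvStepB (PySem.Set.empty, [])).2

-- ===== PRECONDITION & SPEC =====
-- Pre_ excludes exactly the inputs on which the Python raises KeyError: a violation without a
-- "type" key, or a "prohibited_term"/"missing_disclosure" violation without its "term"/"element" key.
def Pre_get_required_actions_py (violations : List (List (String × String))) : Prop :=
  (violations.all (fun v =>
    (PySem.Dict.mk v).contains "type" &&
    (!((PySem.Dict.mk v).getD "type" "" == "prohibited_term") || (PySem.Dict.mk v).contains "term") &&
    (!((PySem.Dict.mk v).getD "type" "" == "missing_disclosure") || (PySem.Dict.mk v).contains "element"))) = true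
instance (violations : List (List (String × String))) : Decidable (Pre_get_required_actions_py violations) := by unfold Pre_get_required_actions_py; infer_instance

def pvWitness_get_required_actions_py : (List (List (String × String))) :=
  [[("type", "missing_consent")], [("type", "prohibited_term"), ("term", "guaranteed")]]

def Spec_get_required_actions_py (violations : List (List (String × String))) (out : List String) : Prop := out = get_required_actions_py_alt violations
instance (violations : List (List (String × String))) (out : List String) : Decidable (Spec_get_required_actions_py violations out) := by unfold Spec_get_required_actions_py; infer_instance

-- ===== CLAIM (what is proved, stated in full; the proofs are below) =====
def Claim_equal_get_required_actions_py : Prop := ∀ (violations : List (List (String × String))), Dom_get_required_actions_py violations → Pre_get_required_actions_py violations → Spec_get_required_actions_py violations (get_required_actions_py violations)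

-- ===== LEMMAS AND PROOFS =====
-- the message B produces for a violation (none = type not in the table), used by both directions
def pvMsg? (violation : List (String × String)) : Option String :=
  (pvTemplates.get? ((PySem.Dict.mk violation).getD "type" "")).map
    (fun template => pvFormat template (PySem.Dict.mk violation))

-- .format on the "term" template = prefix ++ the field's value
theorem pvFormat_prohibited (v : PySem.Dict String String) :
    pvFormat "Remove or replace prohibited term: {term}" v = "Remove or replace prohibited term: " ++ v.getD "term" "" := by
  have h : ("Remove or replace prohibited term: {term}" : String).toList = ['R', 'e', 'm', 'o', 'v', 'e', ' ', 'o', 'r', ' ', 'r', 'e', 'p', 'l', 'a', 'c', 'e', ' ', 'p', 'r', 'o', 'h', 'i', 'b', 'i', 't', 'e', 'd', ' ', 't', 'e', 'r', 'm', ':', ' ', '{', 't', 'e', 'r', 'm', '}'] := by decide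
  have e1 : String.mk ['R', 'e', 'm', 'o', 'v', 'e', ' ', 'o', 'r', ' ', 'r', 'e', 'p', 'l', 'a', 'c', 'e', ' ', 'p', 'r', 'o', 'h', 'i', 'b', 'i', 't', 'e', 'd', ' ', 't', 'e', 'r', 'm', ':', ' '] = "Remove or replace prohibited term: " := rfl
  have e2 : String.mk ['t', 'e', 'r', 'm'] = "term" := rfl
  have e3 : String.mk ([] : List Char) = "" := rfl
  simp [pvFormat, h, pvFormatGo, List.takeWhile, List.dropWhile, e1, e2, e3, String.append_empty]

-- .format on the "element" template = prefix ++ the field's value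
theorem pvFormat_disclosure (v : PySem.Dict String String) :
    pvFormat "Complete FTC-required disclosure: {element}" v = "Complete FTC-required disclosure: " ++ v.getD "element" "" := by
  have h : ("Complete FTC-required disclosure: {element}" : String).toList = ['C', 'o', 'm', 'p', 'l', 'e', 't', 'e', ' ', 'F', 'T', 'C', '-', 'r', 'e', 'q', 'u', 'i', 'r', 'e', 'd', ' ', 'd', 'i', 's', 'c', 'l', 'o', 's', 'u', 'r', 'e', ':', ' ', '{', 'e', 'l', 'e', 'm', 'e', 'n', 't', '}'] := by decide
  have e1 : String.mk ['C', 'o', 'm', 'p', 'l', 'e', 't', 'e', ' ', 'F', 'T', 'C', '-', 'r', 'e', 'q', 'u', 'i', 'r', 'e', 'd', ' ', 'd', 'i', 's', 'c', 'l', 'o', 's', 'u', 'r', 'e', ':', ' '] = "Complete FTC-required disclosure: " := rfl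
  have e2 : String.mk ['e', 'l', 'e', 'm', 'e', 'n', 't'] = "element" := rfl
  have e3 : String.mk ([] : List Char) = "" := rfl
  simp [pvFormat, h, pvFormatGo, List.takeWhile, List.dropWhile, e1, e2, e3, String.append_empty]

theorem pvFormat_fixed0 (v : PySem.Dict String String) :
    pvFormat "Add clear sender identification to email" v = "Add clear sender identification to email" := by
  have h : ("Add clear sender identification to email" : String).toList = ['A', 'd', 'd', ' ', 'c', 'l', 'e', 'a', 'r', ' ', 's', 'e', 'n', 'd', 'e', 'r', ' ', 'i', 'd', 'e', 'n', 't', 'i', 'f', 'i', 'c', 'a', 't', 'i', 'o', 'n', ' ', 't', 'o', ' ', 'e', 'm', 'a', 'i', 'l'] := by decide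
  have e1 : String.mk ['A', 'd', 'd', ' ', 'c', 'l', 'e', 'a', 'r', ' ', 's', 'e', 'n', 'd', 'e', 'r', ' ', 'i', 'd', 'e', 'n', 't', 'i', 'f', 'i', 'c', 'a', 't', 'i', 'o', 'n', ' ', 't', 'o', ' ', 'e', 'm', 'a', 'i', 'l'] = "Add clear sender identification to email" := rfl
  simp [pvFormat, h, pvFormatGo, e1]

theorem pvFormat_fixed1 (v : PySem.Dict String String) :
    pvFormat "Include physical business address in email footer" v = "Include physical business address in email footer" := by
  have h : ("Include physical business address in email footer" : String).toList = ['I', 'n', 'c', 'l', 'u', 'd', 'e', ' ', 'p', 'h', 'y', 's', 'i', 'c', 'a', 'l', ' ', 'b', 'u', 's', 'i', 'n', 'e', 's', 's', ' ', 'a', 'd', 'd', 'r', 'e', 's', 's', ' ', 'i', 'n', ' ', 'e', 'm', 'a', 'i', 'l', ' ', 'f', 'o', 'o', 't', 'e', 'r'] := by decide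
  have e1 : String.mk ['I', 'n', 'c', 'l', 'u', 'd', 'e', ' ', 'p', 'h', 'y', 's', 'i', 'c', 'a', 'l', ' ', 'b', 'u', 's', 'i', 'n', 'e', 's', 's', ' ', 'a', 'd', 'd', 'r', 'e', 's', 's', ' ', 'i', 'n', ' ', 'e', 'm', 'a', 'i', 'l', ' ', 'f', 'o', 'o', 't', 'e', 'r'] = "Include physical business address in email footer" := rfl
  simp [pvFormat, h, pvFormatGo, e1]

theorem pvFormat_fixed2 (v : PySem.Dict String String) :
    pvFormat "Add clear unsubscribe link and instructions" v = "Add clear unsubscribe link and instructions" := by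
  have h : ("Add clear unsubscribe link and instructions" : String).toList = ['A', 'd', 'd', ' ', 'c', 'l', 'e', 'a', 'r', ' ', 'u', 'n', 's', 'u', 'b', 's', 'c', 'r', 'i', 'b', 'e', ' ', 'l', 'i', 'n', 'k', ' ', 'a', 'n', 'd', ' ', 'i', 'n', 's', 't', 'r', 'u', 'c', 't', 'i', 'o', 'n', 's'] := by decide
  have e1 : String.mk ['A', 'd', 'd', ' ', 'c', 'l', 'e', 'a', 'r', ' ', 'u', 'n', 's', 'u', 'b', 's', 'c', 'r', 'i', 'b', 'e', ' ', 'l', 'i', 'n', 'k', ' ', 'a', 'n', 'd', ' ', 'i', 'n', 's', 't', 'r', 'u', 'c', 't', 'i', 'o', 'n', 's'] = "Add clear unsubscribe link and instructions" := rfl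
  simp [pvFormat, h, pvFormatGo, e1]

theorem pvFormat_fixed3 (v : PySem.Dict String String) :
    pvFormat "Add earnings disclaimers or remove specific income claims" v = "Add earnings disclaimers or remove specific income claims" := by
  have h : ("Add earnings disclaimers or remove specific income claims" : String).toList = ['A', 'd', 'd', ' ', 'e', 'a', 'r', 'n', 'i', 'n', 'g', 's', ' ', 'd', 'i', 's', 'c', 'l', 'a', 'i', 'm', 'e', 'r', 's', ' ', 'o', 'r', ' ', 'r', 'e', 'm', 'o', 'v', 'e', ' ', 's', 'p', 'e', 'c', 'i', 'f', 'i', 'c', ' ', 'i', 'n', 'c', 'o', 'm', 'e', ' ', 'c', 'l', 'a', 'i', 'm', 's'] := by decide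
  have e1 : String.mk ['A', 'd', 'd', ' ', 'e', 'a', 'r', 'n', 'i', 'n', 'g', 's', ' ', 'd', 'i', 's', 'c', 'l', 'a', 'i', 'm', 'e', 'r', 's', ' ', 'o', 'r', ' ', 'r', 'e', 'm', 'o', 'v', 'e', ' ', 's', 'p', 'e', 'c', 'i', 'f', 'i', 'c', ' ', 'i', 'n', 'c', 'o', 'm', 'e', ' ', 'c', 'l', 'a', 'i', 'm', 's'] = "Add earnings disclaimers or remove specific income claims" := rfl
  simp [pvFormat, h, pvFormatGo, e1]

theorem pvFormat_fixed4 (v : PySem.Dict String String) :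
    pvFormat "Obtain explicit user consent before data processing" v = "Obtain explicit user consent before data processing" := by
  have h : ("Obtain explicit user consent before data processing" : String).toList = ['O', 'b', 't', 'a', 'i', 'n', ' ', 'e', 'x', 'p', 'l', 'i', 'c', 'i', 't', ' ', 'u', 's', 'e', 'r', ' ', 'c', 'o', 'n', 's', 'e', 'n', 't', ' ', 'b', 'e', 'f', 'o', 'r', 'e', ' ', 'd', 'a', 't', 'a', ' ', 'p', 'r', 'o', 'c', 'e', 's', 's', 'i', 'n', 'g'] := by decide
  have e1 : String.mk ['O', 'b', 't', 'a', 'i', 'n', ' ', 'e', 'x', 'p', 'l', 'i', 'c', 'i', 't', ' ', 'u', 's', 'e', 'r', ' ', 'c', 'o', 'n', 's', 'e', 'n', 't', ' ', 'b', 'e', 'f', 'o', 'r', 'e', ' ', 'd', 'a', 't', 'a', ' ', 'p', 'r', 'o', 'c', 'e', 's', 's', 'i', 'n', 'g'] = "Obtain explicit user consent before data processing" := rfl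
  simp [pvFormat, h, pvFormatGo, e1]


-- the table lookup, spelled out per type
theorem get?_pvTemplates (t : String) : pvTemplates.get? t =
    if t == "prohibited_term" then some "Remove or replace prohibited term: {term}"
    else if t == "missing_sender_id" then some "Add clear sender identification to email"
    else if t == "missing_physical_address" then some "Include physical business address in email footer"
    else if t == "missing_unsubscribe" then some "Add clear unsubscribe link and instructions"
    else if t == "unsubstantiated_earnings_claim" then some "Add earnings disclaimers or remove specific income claims"
    else if t == "missing_consent" then some "Obtain explicit user consent before data processing"
    else if t == "missing_disclosure" then some "Complete FTC-required disclosure: {element}"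
    else none := by
  by_cases h1 : t = "prohibited_term"
  · simp [pvTemplates, PySem.Dict.get?, h1]
  by_cases h2 : t = "missing_sender_id"
  · simp [pvTemplates, PySem.Dict.get?, List.find?, h2]
  by_cases h3 : t = "missing_physical_address"
  · simp [pvTemplates, PySem.Dict.get?, List.find?, h3]
  by_cases h4 : t = "missing_unsubscribe"
  · simp [pvTemplates, PySem.Dict.get?, List.find?, h4]
  by_cases h5 : t = "unsubstantiated_earnings_claim"
  · simp [pvTemplates, PySem.Dict.get?, List.find?, h5]
  by_cases h6 : t = "missing_consent"
  · simp [pvTemplates, PySem.Dict.get?, List.find?, h6]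
  by_cases h7 : t = "missing_disclosure"
  · simp [pvTemplates, PySem.Dict.get?, List.find?, h7]
  · have e1 : ("prohibited_term" == t) = false := by simp [Ne.symm h1]
    have e2 : ("missing_sender_id" == t) = false := by simp [Ne.symm h2]
    have e3 : ("missing_physical_address" == t) = false := by simp [Ne.symm h3]
    have e4 : ("missing_unsubscribe" == t) = false := by simp [Ne.symm h4]
    have e5 : ("unsubstantiated_earnings_claim" == t) = false := by simp [Ne.symm h5]
    have e6 : ("missing_consent" == t) = false := by simp [Ne.symm h6]
    have e7 : ("missing_disclosure" == t) = false := by simp [Ne.symm h7]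
    simp [pvTemplates, PySem.Dict.get?, List.find?, e1, e2, e3, e4, e5, e6, e7, h1, h2, h3, h4, h5, h6, h7]

-- A's branch ladder appends exactly the message pvMsg? yields
theorem pvStepA_eq (actions : List String) (violation : List (String × String)) :
    pvStepA actions violation = actions ++ (pvMsg? violation).toList := by
  simp only [pvStepA, pvMsg?]
  rw [get?_pvTemplates]
  split_ifs <;>
    simp [pvFormat_prohibited, pvFormat_disclosure, pvFormat_fixed0, pvFormat_fixed1,
      pvFormat_fixed2, pvFormat_fixed3, pvFormat_fixed4]

-- B's loop body, on a state whose seen-set and output list coincide, is Set.add of the message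
theorem pvStepB_eq (s : List String) (violation : List (String × String)) :
    pvStepB (s, s) violation =
      ((pvMsg? violation).toList.foldl PySem.Set.add s,
       (pvMsg? violation).toList.foldl PySem.Set.add s) := by
  simp only [pvStepB, pvMsg?]
  cases h : pvTemplates.get? ((PySem.Dict.mk violation).getD "type" "") with
  | none => simp
  | some template =>
      simp only [Option.map_some, Option.toList_some, List.foldl_cons, List.foldl_nil]
      simp only [PySem.Set.add, PySem.Set.contains]
      split_ifs <;> simp_all

-- folding A's loop = the accumulator ++ all produced messages
theorem foldA_eq (vs : List (List (String × String))) (acc : List String) :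
    vs.foldl pvStepA acc = acc ++ vs.filterMap pvMsg? := by
  induction vs generalizing acc with
  | nil => simp
  | cons v vs ih =>
      rw [List.foldl_cons, pvStepA_eq, ih, List.filterMap_cons]
      cases pvMsg? v <;> simp

-- folding B's loop from a diagonal state stays diagonal and is a Set.add-fold over the messages
theorem foldB_eq (vs : List (List (String × String))) (s : List String) :
    vs.foldl pvStepB (s, s) =
      ((vs.filterMap pvMsg?).foldl PySem.Set.add s,
       (vs.filterMap pvMsg?).foldl PySem.Set.add s) := by
  induction vs generalizing s with
  | nil => simp
  | cons v vs ih =>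
      rw [List.foldl_cons, pvStepB_eq, List.filterMap_cons]
      cases pvMsg? v <;> simp [ih]

-- ===== VERDICT (by name: the statement is the Claim_ definition above) =====
theorem get_required_actions_py_spec : Claim_equal_get_required_actions_py := by
  intro violations _ _
  unfold Spec_get_required_actions_py get_required_actions_py get_required_actions_py_alt
  rw [foldA_eq]
  have hB : (PySem.Set.empty, ([] : List String)) = (([] : List String), ([] : List String)) := rfl
  rw [hB, foldB_eq]
  simp [PySem.Set.ofList_eq_foldl]
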